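-- pv_equiv track=rewrite | github.com/jcniabemr/bioinformaticsTools | idenfitySequencingPlatform.py | detect_quality_encoding
-- ===== SOURCE A (Python) =====
-- def detect_quality_encoding(quality_scores):
--     ascii_values = [ord(q) for q in quality_scores]
--     min_q = min(ascii_values)
--     max_q = max(ascii_values)
--
--     # Define possible encoding schemes
--     encodings = {
--         'Phred+33 (Sanger, Illumina 1.8+)': range(33, 74),
--         'Phred+64 (Illumina 1.3+)': range(64, 104),
--         'Solexa+64 (Solexa/Illumina 1.0)': range(59, 104),
--         'Illumina 1.5+ (Phred+64)': range(66, 104),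
--     }
--
--     possible_encodings = []
--     for encoding, ascii_range in encodings.items():
--         if min_q in ascii_range and max_q in ascii_range:
--             possible_encodings.append(encoding)
--
--     if not possible_encodings:
--         return 'Unknown'
--     elif len(possible_encodings) == 1:
--         return possible_encodings[0]
--     else:
--         return ', '.join(possible_encodings)
-- ===== SOURCE B (Python) =====
-- def detect_quality_encoding(quality_scores):
--     candidates = [
--         ('Phred+33 (Sanger, Illumina 1.8+)', 33, 74),
--         ('Phred+64 (Illumina 1.3+)', 64, 104),
--         ('Solexa+64 (Solexa/Illumina 1.0)', 59, 104),
--         ('Illumina 1.5+ (Phred+64)', 66, 104),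
--     ]
--     for q in quality_scores:
--         v = ord(q)
--         candidates = [(name, lo, hi) for (name, lo, hi) in candidates if lo <= v < hi]
--         if not candidates:
--             break
--     names = [name for (name, _, _) in candidates]
--     if not names:
--         return 'Unknown'
--     if len(names) == 1:
--         return names[0]
--     return ', '.join(names)
-- ===== Notes on version B (the rewrite author's own statement) =====
-- stated objective: alternative
-- what changed: B drops the min/max computation and the scan of the encoding table against (min,max): it makes one pass over the characters, pruning a candidate list of encodings by each character's ord (with early exit when no candidate survives), then applies the same Unknown/single/join logic.
import Mathlib
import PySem

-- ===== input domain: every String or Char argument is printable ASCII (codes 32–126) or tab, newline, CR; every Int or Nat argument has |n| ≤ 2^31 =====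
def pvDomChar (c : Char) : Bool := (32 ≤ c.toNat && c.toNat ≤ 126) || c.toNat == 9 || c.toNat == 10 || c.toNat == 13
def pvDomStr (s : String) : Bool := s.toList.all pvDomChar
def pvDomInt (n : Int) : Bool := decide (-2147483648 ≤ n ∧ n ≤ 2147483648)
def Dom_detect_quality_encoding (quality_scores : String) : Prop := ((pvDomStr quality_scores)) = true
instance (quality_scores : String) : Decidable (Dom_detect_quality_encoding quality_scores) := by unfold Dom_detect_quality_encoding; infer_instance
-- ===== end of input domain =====

-- B replaces the min/max computation plus table scan with a single candidate-pruning pass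
-- over the characters (objective: alternative decomposition, same asymptotic cost).


-- ===== PORT A =====
-- A's encodings dict as an association list of (name, lo, hi) with range(lo, hi)
def pvEncodingsA : List (String × Int × Int) :=
  [("Phred+33 (Sanger, Illumina 1.8+)", 33, 74),
   ("Phred+64 (Illumina 1.3+)", 64, 104),
   ("Solexa+64 (Solexa/Illumina 1.0)", 59, 104),
   ("Illumina 1.5+ (Phred+64)", 66, 104)]

def detect_quality_encoding (quality_scores : String) : String :=
  let ascii_values : List Int := quality_scores.toList.map (fun q => (q.toNat : Int))
  match PySem.List.min? ascii_values (fun x => x), PySem.List.max? ascii_values (fun x => x) with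
  | some min_q, some max_q =>
    let possible_encodings := pvEncodingsA.foldl (fun acc e =>
      if (e.2.1 ≤ min_q ∧ min_q < e.2.2) ∧ (e.2.1 ≤ max_q ∧ max_q < e.2.2)
      then acc ++ [e.1] else acc) []
    if possible_encodings = [] then "Unknown"
    else if possible_encodings.length = 1 then possible_encodings.getD 0 ""
    else PySem.Str.join ", " possible_encodings
  | _, _ => ""   -- min([]) raises ValueError: excluded by Pre_

-- ===== PORT B =====
def pvCandidatesB : List (String × Int × Int) :=
  [("Phred+33 (Sanger, Illumina 1.8+)", 33, 74),
   ("Phred+64 (Illumina 1.3+)", 64, 104),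
   ("Solexa+64 (Solexa/Illumina 1.0)", 59, 104),
   ("Illumina 1.5+ (Phred+64)", 66, 104)]

-- the 'for q in quality_scores' loop with the early 'break' when no candidate survives
def pvFiltB : List Char → List (String × Int × Int) → List (String × Int × Int)
  | [], cs => cs
  | q :: rest, cs =>
    let v : Int := q.toNat
    let cs' := cs.filter (fun t => decide (t.2.1 ≤ v ∧ v < t.2.2))
    if cs' = [] then cs' else pvFiltB rest cs'

def detect_quality_encoding_alt (quality_scores : String) : String :=
  let names := (pvFiltB quality_scores.toList pvCandidatesB).map (·.1)
  if names = [] then "Unknown"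
  else if names.length = 1 then names.getD 0 ""
  else PySem.Str.join ", " names

-- ===== PRECONDITION & SPEC =====
-- Pre_ excludes only the empty string, on which A raises ValueError (min of an empty list).
def Pre_detect_quality_encoding (quality_scores : String) : Prop := quality_scores.toList ≠ []
instance (quality_scores : String) : Decidable (Pre_detect_quality_encoding quality_scores) := by unfold Pre_detect_quality_encoding; infer_instance
def pvWitness_detect_quality_encoding : String := "II"

def Spec_detect_quality_encoding (quality_scores : String) (out : String) : Prop := out = detect_quality_encoding_alt quality_scores
instance (quality_scores : String) (out : String) : Decidable (Spec_detect_quality_encoding quality_scores out) := by unfold Spec_detect_quality_encoding; infer_instance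

-- ===== CLAIM (what is proved, stated in full; the proofs are below) =====
def Claim_equal_detect_quality_encoding : Prop := ∀ (quality_scores : String), Dom_detect_quality_encoding quality_scores → Pre_detect_quality_encoding quality_scores → Spec_detect_quality_encoding quality_scores (detect_quality_encoding quality_scores)

-- ===== LEMMAS AND PROOFS =====

-- B's pruning loop with break = one filter by "every character is in the candidate's range"
theorem pvFiltB_eq (l : List Char) (cs : List (String × Int × Int)) :
    pvFiltB l cs = cs.filter (fun t => l.all (fun q => decide (t.2.1 ≤ (q.toNat : Int) ∧ (q.toNat : Int) < t.2.2))) := by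
  induction l generalizing cs with
  | nil => simp [pvFiltB]
  | cons q rest ih =>
    simp only [pvFiltB]
    by_cases h : cs.filter (fun t => decide (t.2.1 ≤ (q.toNat : Int) ∧ (q.toNat : Int) < t.2.2)) = []
    · rw [if_pos h, h]
      symm
      rw [List.filter_eq_nil_iff]
      rw [List.filter_eq_nil_iff] at h
      intro t ht hall
      simp only [List.all_cons, Bool.and_eq_true] at hall
      exact h t ht hall.1
    · rw [if_neg h, ih, List.filter_filter]
      apply List.filter_congr
      intro t _
      simp [Bool.and_comm]

-- ===== VERDICT =====
theorem detect_quality_encoding_spec : Claim_equal_detect_quality_encoding := by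
  intro qs _ hpre
  unfold Spec_detect_quality_encoding detect_quality_encoding detect_quality_encoding_alt
  unfold Pre_detect_quality_encoding at hpre
  dsimp only
  set av : List Int := qs.toList.map (fun q => (q.toNat : Int)) with hav
  have havne : av ≠ [] := by simpa [hav] using hpre
  obtain ⟨m, hm⟩ : ∃ m, PySem.List.min? av (fun x => x) = some m := by
    cases h : PySem.List.min? av (fun x => x) with
    | none => exact absurd ((PySem.List.min?_eq_none_iff av _).mp h) havne
    | some m => exact ⟨m, rfl⟩
  obtain ⟨M, hM⟩ : ∃ M, PySem.List.max? av (fun x => x) = some M := by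
    cases h : PySem.List.max? av (fun x => x) with
    | none => exact absurd ((PySem.List.max?_eq_none_iff av _).mp h) havne
    | some M => exact ⟨M, rfl⟩
  rw [hm, hM]
  dsimp only
  have hfun : (fun (acc : List String) (e : String × Int × Int) =>
      if (e.2.1 ≤ m ∧ m < e.2.2) ∧ (e.2.1 ≤ M ∧ M < e.2.2) then acc ++ [e.1] else acc)
      = (fun acc e => if (decide ((e.2.1 ≤ m ∧ m < e.2.2) ∧ (e.2.1 ≤ M ∧ M < e.2.2))) = true
          then acc ++ [e.1] else acc) := by
    funext acc e; simp
  rw [hfun, PySem.List.foldl_append_if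
    (fun e => decide ((e.2.1 ≤ m ∧ m < e.2.2) ∧ (e.2.1 ≤ M ∧ M < e.2.2)))
    (fun e => e.1) pvEncodingsA []]
  rw [pvFiltB_eq]
  have hfilter :
      pvEncodingsA.filter (fun e => decide ((e.2.1 ≤ m ∧ m < e.2.2) ∧ (e.2.1 ≤ M ∧ M < e.2.2)))
      = pvCandidatesB.filter (fun t => qs.toList.all (fun q => decide (t.2.1 ≤ (q.toNat : Int) ∧ (q.toNat : Int) < t.2.2))) := by
    have : pvEncodingsA = pvCandidatesB := rfl
    rw [this]
    apply List.filter_congr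
    intro t _
    rw [Bool.eq_iff_iff]
    simp only [decide_eq_true_eq, List.all_eq_true]
    constructor
    · rintro ⟨⟨h1, _⟩, ⟨_, h4⟩⟩ q hq
      have hqav : ((q.toNat : Int)) ∈ av := by
        simp only [hav, List.mem_map]; exact ⟨q, hq, rfl⟩
      exact ⟨le_trans h1 (PySem.List.min?_isMin hm _ hqav),
             lt_of_le_of_lt (PySem.List.max?_isMax hM _ hqav) h4⟩
    · intro hall
      have hmmem := PySem.List.min?_mem hm
      have hMmem := PySem.List.max?_mem hM
      obtain ⟨qm, hqm, hqm'⟩ := by simpa [hav, List.mem_map] using hmmem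
      obtain ⟨qM, hqM, hqM'⟩ := by simpa [hav, List.mem_map] using hMmem
      have h1 := hall qm hqm
      have h2 := hall qM hqM
      rw [hqm'] at h1; rw [hqM'] at h2
      exact ⟨⟨h1.1, h1.2⟩, ⟨h2.1, h2.2⟩⟩
  rw [hfilter, List.nil_append]
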